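-- pv_equiv track=rewrite | github.com/Mizuna737/dotfiles | Scripts/lib/localModel.py | _toonParseLine
-- ===== SOURCE A (Python) =====
-- def _toonParseLine(line):
--     """Split a TOON data row into values, respecting quoted strings."""
--     values = []
--     i = 0
--     while i < len(line):
--         if line[i] == ' ':
--             i += 1
--             continue
--         if line[i] == '"':
--             # Quoted value: scan for closing unescaped quote
--             i += 1
--             buf = []
--             while i < len(line):
--                 c = line[i]
--                 if c == '\\' and i + 1 < len(line):
--                     buf.append(line[i + 1])
--                     i += 2
--                 elif c == '"':
--                     i += 1
--                     break
--                 else: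
--                     buf.append(c)
--                     i += 1
--             values.append("".join(buf))
--         else:
--             # Unquoted: read until space
--             j = i
--             while j < len(line) and line[j] != ' ':
--                 j += 1
--             values.append(line[i:j])
--             i = j
--     return values
-- ===== SOURCE B (Python) =====
-- def _toonParseLine(line):
--     """Split a TOON data row into values, respecting quoted strings."""
--     DEFAULT, UNQUOTED, QUOTED = 0, 1, 2
--     values = []
--     buf = []
--     state = DEFAULT
--     escape = False
--     for c in line:
--         if state == DEFAULT:
--             if c == ' ':
--                 pass
--             elif c == '"':
--                 state = QUOTED
--                 buf = []
--             else:
--                 state = UNQUOTED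
--                 buf = [c]
--         elif state == UNQUOTED:
--             if c == ' ':
--                 values.append(''.join(buf))
--                 state = DEFAULT
--             else:
--                 buf.append(c)
--         else:  # QUOTED
--             if escape:
--                 buf.append(c)
--                 escape = False
--             elif c == '\\':
--                 escape = True
--             elif c == '"':
--                 values.append(''.join(buf))
--                 state = DEFAULT
--             else:
--                 buf.append(c)
--     if state == QUOTED and escape:
--         buf.append('\\')  # trailing backslash inside a quote is kept literally
--     if state != DEFAULT:
--         values.append(''.join(buf))
--     return values
-- ===== Notes on version B (the rewrite author's own statement) =====
-- stated objective: idiomatic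
-- what changed: Replaced A's index-juggling while-loops with nested scanners by a single flat character-by-character state machine (DEFAULT/UNQUOTED/QUOTED plus an escape flag) folded once over the string.
import Mathlib
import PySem

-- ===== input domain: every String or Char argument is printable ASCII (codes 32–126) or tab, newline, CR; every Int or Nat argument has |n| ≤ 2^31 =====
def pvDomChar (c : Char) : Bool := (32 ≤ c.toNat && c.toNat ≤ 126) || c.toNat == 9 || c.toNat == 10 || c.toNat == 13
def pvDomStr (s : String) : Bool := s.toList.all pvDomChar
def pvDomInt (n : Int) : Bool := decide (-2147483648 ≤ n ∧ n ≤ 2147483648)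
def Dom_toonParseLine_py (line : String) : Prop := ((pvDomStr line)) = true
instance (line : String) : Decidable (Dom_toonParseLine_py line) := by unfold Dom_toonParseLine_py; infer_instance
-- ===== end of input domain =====

-- B rewrites A's index-juggling while-loops as one flat three-state character machine (idiomatic; same O(n) cost).

-- ===== PORT A =====
-- A's while-loops are ported as fuel-bounded structural recursion over the same state (i, buf, values);
-- the loop condition stays `i < len(line)`, fuel only makes the recursion structural: the index advances
-- by at least one per consumed fuel unit, so fuel = length + 1 never runs out.

-- inner `while` of the quoted branch: returns (buf, i) as left by the loop
def pyA_inner (l : List Char) (fuel i : Nat) (buf : List Char) : List Char × Nat :=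
  match fuel with
  | 0 => (buf, i)
  | fuel + 1 =>
    if h : i < l.length then
      if h2 : l[i] = '\\' ∧ i + 1 < l.length then
        pyA_inner l fuel (i + 2) (buf ++ [l[i+1]'h2.2])
      else if l[i] = '"' then (buf, i + 1)
      else pyA_inner l fuel (i + 1) (buf ++ [l[i]])
    else (buf, i)

-- the `while j < len(line) and line[j] != ' '` scan of the unquoted branch: returns j
def pyA_seek (l : List Char) (fuel j : Nat) : Nat :=
  match fuel with
  | 0 => j
  | fuel + 1 =>
    if h : j < l.length then
      if l[j] ≠ ' ' then pyA_seek l fuel (j + 1) else j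
    else j

-- outer `while i < len(line)` loop; line[i:j] with i ≤ j ≤ len is exactly (l.drop i).take (j - i)
def pyA_main (l : List Char) (fuel i : Nat) (values : List String) : List String :=
  match fuel with
  | 0 => values
  | fuel + 1 =>
    if h : i < l.length then
      if l[i] = ' ' then pyA_main l fuel (i + 1) values
      else if l[i] = '"' then
        let r := pyA_inner l fuel (i + 1) []
        pyA_main l fuel r.2 (values ++ [String.ofList r.1])
      else
        let j := pyA_seek l fuel i
        pyA_main l fuel j (values ++ [String.ofList ((l.drop i).take (j - i))])
    else values

def toonParseLine_py (line : String) : List String :=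
  pyA_main line.toList (line.toList.length + 1) 0 []

-- ===== PORT B =====
-- machine state: (values, state, buf, escape); state 0 = DEFAULT, 1 = UNQUOTED, 2 = QUOTED
def pyB_step (s : List String × Nat × List Char × Bool) (c : Char) :
    List String × Nat × List Char × Bool :=
  match s with
  | (values, state, buf, escape) =>
    if state = 0 then
      if c = ' ' then (values, 0, buf, escape)
      else if c = '"' then (values, 2, [], escape)
      else (values, 1, [c], escape)
    else if state = 1 then
      if c = ' ' then (values ++ [String.ofList buf], 0, buf, escape)
      else (values, 1, buf ++ [c], escape)
    else
      if escape then (values, 2, buf ++ [c], false)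
      else if c = '\\' then (values, 2, buf, true)
      else if c = '"' then (values ++ [String.ofList buf], 0, buf, escape)
      else (values, 2, buf ++ [c], escape)

-- the post-loop flush
def pyB_finish (s : List String × Nat × List Char × Bool) : List String :=
  match s with
  | (values, state, buf, escape) =>
    let buf := if state = 2 ∧ escape then buf ++ ['\\'] else buf
    if state ≠ 0 then values ++ [String.ofList buf] else values

def toonParseLine_py_alt (line : String) : List String :=
  pyB_finish (line.toList.foldl pyB_step ([], 0, [], false))

-- ===== PRECONDITION & SPEC =====
def Spec_toonParseLine_py (line : String) (out : List String) : Prop := out = toonParseLine_py_alt line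
instance (line : String) (out : List String) : Decidable (Spec_toonParseLine_py line out) := by unfold Spec_toonParseLine_py; infer_instance

-- ===== CLAIM (what is proved, stated in full; the proofs are below) =====
def Claim_equal_toonParseLine_py : Prop := ∀ (line : String), Dom_toonParseLine_py line → Spec_toonParseLine_py line (toonParseLine_py line)

-- ===== LEMMAS AND PROOFS =====

lemma pyA_seek_ge (l : List Char) : ∀ (fuel j : Nat), j ≤ pyA_seek l fuel j := by
  intro fuel
  induction fuel with
  | zero => intro j; simp [pyA_seek]
  | succ fuel ih =>
    intro j
    rw [pyA_seek]
    by_cases h1 : j < l.length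
    · simp only [dif_pos h1]
      by_cases h2 : l[j] = ' '
      · simp [h2]
      · have := ih (j + 1)
        simp only [ne_eq, h2, not_false_eq_true, if_true]
        omega
    · simp only [dif_neg h1]; exact Nat.le_refl j

-- one-step evaluation lemmas for B's machine
lemma stepD_sp (v : List String) (b : List Char) (e : Bool) :
    pyB_step (v, 0, b, e) ' ' = (v, 0, b, e) := rfl
lemma stepD_q (v : List String) (b : List Char) (e : Bool) :
    pyB_step (v, 0, b, e) '"' = (v, 2, [], e) := rfl
lemma stepD_other (v : List String) (b : List Char) (e : Bool) (c : Char)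
    (h1 : c ≠ ' ') (h2 : c ≠ '"') : pyB_step (v, 0, b, e) c = (v, 1, [c], e) := by
  simp [pyB_step, h1, h2]
lemma stepU_sp (v : List String) (b : List Char) (e : Bool) :
    pyB_step (v, 1, b, e) ' ' = (v ++ [String.ofList b], 0, b, e) := rfl
lemma stepU_other (v : List String) (b : List Char) (e : Bool) (c : Char) (h : c ≠ ' ') :
    pyB_step (v, 1, b, e) c = (v, 1, b ++ [c], e) := by
  simp [pyB_step, h]
lemma stepQ_esc (v : List String) (b : List Char) (c : Char) :
    pyB_step (v, 2, b, true) c = (v, 2, b ++ [c], false) := rfl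
lemma stepQ_bs (v : List String) (b : List Char) :
    pyB_step (v, 2, b, false) '\\' = (v, 2, b, true) := rfl
lemma stepQ_q (v : List String) (b : List Char) :
    pyB_step (v, 2, b, false) '"' = (v ++ [String.ofList b], 0, b, false) := rfl
lemma stepQ_other (v : List String) (b : List Char) (c : Char)
    (h1 : c ≠ '\\') (h2 : c ≠ '"') : pyB_step (v, 2, b, false) c = (v, 2, b ++ [c], false) := by
  simp [pyB_step, h1, h2]

-- loop exits once the index has reached the end of the line, whatever fuel remains
lemma pyA_inner_stop (l : List Char) (fI i : Nat) (buf : List Char) (h : l.length ≤ i) :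
    pyA_inner l fI i buf = (buf, i) := by
  cases fI with
  | zero => rfl
  | succ f => rw [pyA_inner]; simp [Nat.not_lt_of_le h]

lemma pyA_seek_stop (l : List Char) (fS i : Nat) (h : l.length ≤ i) :
    pyA_seek l fS i = i := by
  cases fS with
  | zero => rfl
  | succ f => rw [pyA_seek]; simp [Nat.not_lt_of_le h]

lemma pyA_main_stop (l : List Char) (fM i : Nat) (values : List String) (h : l.length ≤ i) :
    pyA_main l fM i values = values := by
  cases fM with
  | zero => rfl
  | succ f => rw [pyA_main]; simp [Nat.not_lt_of_le h]

-- the simultaneous invariant: from any position i, running B's machine over the rest of the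
-- line in each of the three states computes exactly what the corresponding loop of A computes,
-- for every sufficient amount of fuel
lemma pv_main_lemma (l : List Char) : ∀ (k i : Nat), l.length - i ≤ k →
    ((∀ (fM : Nat) (values : List String) (buf : List Char), l.length - i < fM →
        pyB_finish (List.foldl pyB_step (values, 0, buf, false) (l.drop i)) =
          pyA_main l fM i values)
   ∧ (∀ (fI fM : Nat) (values : List String) (buf : List Char),
        l.length - i ≤ fI → l.length - i < fM →
        pyB_finish (List.foldl pyB_step (values, 2, buf, false) (l.drop i)) =
          pyA_main l fM (pyA_inner l fI i buf).2
            (values ++ [String.ofList (pyA_inner l fI i buf).1]))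
   ∧ (∀ (fS fM : Nat) (values : List String) (buf : List Char),
        l.length - i ≤ fS → l.length - i < fM →
        pyB_finish (List.foldl pyB_step (values, 1, buf, false) (l.drop i)) =
          pyA_main l fM (pyA_seek l fS i)
            (values ++ [String.ofList (buf ++ (l.drop i).take (pyA_seek l fS i - i))]))) := by
  intro k
  induction k with
  | zero =>
    intro i h
    have hlen : l.length ≤ i := by omega
    have hd : l.drop i = [] := List.drop_of_length_le hlen
    refine ⟨?_, ?_, ?_⟩
    · intro fM values buf hM
      rw [hd, List.foldl_nil, pyA_main_stop l fM i values hlen]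
      rfl
    · intro fI fM values buf hI hM
      rw [hd, List.foldl_nil, pyA_inner_stop l fI i buf hlen,
        pyA_main_stop l fM i _ hlen]
      rfl
    · intro fS fM values buf hS hM
      rw [hd, List.foldl_nil, pyA_seek_stop l fS i hlen,
        pyA_main_stop l fM i _ hlen]
      simp [pyB_finish]
  | succ k ih =>
    intro i h
    by_cases hlen : i < l.length
    case neg =>
      have hlen' : l.length ≤ i := by omega
      have hd : l.drop i = [] := List.drop_of_length_le hlen'
      refine ⟨?_, ?_, ?_⟩
      · intro fM values buf hM
        rw [hd, List.foldl_nil, pyA_main_stop l fM i values hlen']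
        rfl
      · intro fI fM values buf hI hM
        rw [hd, List.foldl_nil, pyA_inner_stop l fI i buf hlen',
          pyA_main_stop l fM i _ hlen']
        rfl
      · intro fS fM values buf hS hM
        rw [hd, List.foldl_nil, pyA_seek_stop l fS i hlen',
          pyA_main_stop l fM i _ hlen']
        simp [pyB_finish]
    case pos =>
    obtain ⟨P1, Q1, U1⟩ := ih (i + 1) (by omega)
    have hd : l.drop i = l[i] :: l.drop (i + 1) := by
      rw [List.drop_eq_getElem_cons hlen]
    refine ⟨?_, ?_, ?_⟩
    · -- DEFAULT state ↔ outer loop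
      intro fM values buf hM
      obtain ⟨g, rfl⟩ : ∃ g, fM = g + 1 := ⟨fM - 1, by omega⟩
      rw [hd, List.foldl_cons]
      by_cases hsp : l[i] = ' '
      · have hm : pyA_main l (g + 1) i values = pyA_main l g (i + 1) values := by
          rw [pyA_main]; simp only [dif_pos hlen, if_pos hsp]
        rw [hsp, stepD_sp, hm]
        exact P1 g values buf (by omega)
      · by_cases hq : l[i] = '"'
        · have hm : pyA_main l (g + 1) i values =
              pyA_main l g (pyA_inner l g (i + 1) []).2
                (values ++ [String.ofList (pyA_inner l g (i + 1) []).1]) := by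
            rw [pyA_main]; simp only [dif_pos hlen, if_neg hsp, if_pos hq]
          rw [hq, stepD_q, hm]
          exact Q1 g g values [] (by omega) (by omega)
        · obtain ⟨f, rfl⟩ : ∃ f, g = f + 1 := ⟨g - 1, by omega⟩
          have hm : pyA_main l (f + 1 + 1) i values =
              pyA_main l (f + 1) (pyA_seek l (f + 1) i)
                (values ++ [String.ofList ((l.drop i).take (pyA_seek l (f + 1) i - i))]) := by
            rw [pyA_main]; simp only [dif_pos hlen, if_neg hsp, if_neg hq]
          have hse : pyA_seek l (f + 1) i = pyA_seek l f (i + 1) := by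
            rw [pyA_seek]; simp [hlen, hsp]
          have hge : i + 1 ≤ pyA_seek l f (i + 1) := pyA_seek_ge l f (i + 1)
          have ht : List.take (pyA_seek l f (i + 1) - i) (l[i] :: l.drop (i + 1)) =
              l[i] :: (l.drop (i + 1)).take (pyA_seek l f (i + 1) - (i + 1)) := by
            rw [show pyA_seek l f (i + 1) - i = (pyA_seek l f (i + 1) - (i + 1)) + 1 by omega,
              List.take_succ_cons]
          rw [stepD_other values buf false l[i] hsp hq,
            U1 f (f + 1) values [l[i]] (by omega) (by omega), hm, hse, hd, ht]
          simp
    · -- QUOTED state ↔ inner while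
      intro fI fM values buf hI hM
      obtain ⟨f, rfl⟩ : ∃ f, fI = f + 1 := ⟨fI - 1, by omega⟩
      by_cases hbs : l[i] = '\\' ∧ i + 1 < l.length
      · obtain ⟨-, Q2, -⟩ := ih (i + 2) (by omega)
        have hd2 : l.drop (i + 1) = l[i + 1] :: l.drop (i + 2) := by
          rw [List.drop_eq_getElem_cons hbs.2]
        have hinner : pyA_inner l (f + 1) i buf = pyA_inner l f (i + 2) (buf ++ [l[i + 1]]) := by
          rw [pyA_inner]; simp only [dif_pos hlen, dif_pos hbs]
        rw [hd, hd2, List.foldl_cons, List.foldl_cons, hbs.1, stepQ_bs, stepQ_esc, hinner]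
        exact Q2 f fM values (buf ++ [l[i + 1]]) (by omega) (by omega)
      · by_cases hq : l[i] = '"'
        · have hinner : pyA_inner l (f + 1) i buf = (buf, i + 1) := by
            rw [pyA_inner]; simp only [dif_pos hlen, dif_neg hbs, if_pos hq]
          rw [hd, List.foldl_cons, hq, stepQ_q, hinner]
          exact P1 fM (values ++ [String.ofList buf]) buf (by omega)
        · by_cases hb : l[i] = '\\'
          · -- lone backslash ending the line: A keeps it literally, B flushes it from `escape`
            have hend : l.length ≤ i + 1 := by
              by_contra hc; exact hbs ⟨hb, by omega⟩
            have hd2 : l.drop (i + 1) = [] := List.drop_of_length_le hend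
            have hinner : pyA_inner l (f + 1) i buf = (buf ++ ['\\'], i + 1) := by
              rw [pyA_inner, dif_pos hlen, dif_neg hbs, if_neg hq, hb]
              exact pyA_inner_stop l f (i + 1) (buf ++ ['\\']) hend
            rw [hd, List.foldl_cons, hb, stepQ_bs, hd2, List.foldl_nil, hinner,
              pyA_main_stop l fM (i + 1) _ hend]
            rfl
          · have hinner : pyA_inner l (f + 1) i buf = pyA_inner l f (i + 1) (buf ++ [l[i]]) := by
              rw [pyA_inner]; simp only [dif_pos hlen, dif_neg hbs, if_neg hq]
            rw [hd, List.foldl_cons, stepQ_other values buf l[i] hb hq, hinner]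
            exact Q1 f fM values (buf ++ [l[i]]) (by omega) (by omega)
    · -- UNQUOTED state ↔ seek-and-slice
      intro fS fM values buf hS hM
      obtain ⟨f, rfl⟩ : ∃ f, fS = f + 1 := ⟨fS - 1, by omega⟩
      obtain ⟨g, rfl⟩ : ∃ g, fM = g + 1 := ⟨fM - 1, by omega⟩
      rw [hd, List.foldl_cons]
      by_cases hsp : l[i] = ' '
      · have hse : pyA_seek l (f + 1) i = i := by rw [pyA_seek]; simp [hlen, hsp]
        have hm : pyA_main l (g + 1) i (values ++ [String.ofList buf]) =
            pyA_main l g (i + 1) (values ++ [String.ofList buf]) := by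
          rw [pyA_main]; simp only [dif_pos hlen, if_pos hsp]
        rw [hsp, stepU_sp, P1 g (values ++ [String.ofList buf]) buf (by omega), hse, ← hm]
        simp
      · have hse : pyA_seek l (f + 1) i = pyA_seek l f (i + 1) := by
          rw [pyA_seek]; simp [hlen, hsp]
        have hge : i + 1 ≤ pyA_seek l f (i + 1) := pyA_seek_ge l f (i + 1)
        have ht : List.take (pyA_seek l f (i + 1) - i) (l[i] :: l.drop (i + 1)) =
            l[i] :: (l.drop (i + 1)).take (pyA_seek l f (i + 1) - (i + 1)) := by
          rw [show pyA_seek l f (i + 1) - i = (pyA_seek l f (i + 1) - (i + 1)) + 1 by omega,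
            List.take_succ_cons]
        rw [stepU_other values buf false l[i] hsp,
          U1 f (g + 1) values (buf ++ [l[i]]) (by omega) (by omega), hse, ht]
        simp

-- ===== VERDICT (by name: the statement is the Claim_ definition above) =====
theorem toonParseLine_py_spec : Claim_equal_toonParseLine_py := by
  intro line _
  unfold Spec_toonParseLine_py toonParseLine_py toonParseLine_py_alt
  have h := (pv_main_lemma line.toList line.toList.length 0 (by omega)).1
    (line.toList.length + 1) [] [] (by omega)
  simpa using h.symm
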